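-- pv_equiv track=rewrite | github.com/Marina-Banov/STEM-Games | 2019/all_the_boxes.py | row_start_even
-- ===== SOURCE A (Python) =====
-- def row_start_even(n):
--     prev = 5 if n % 2 else 7
--     step = 8 if n % 2 else 10
--     meta_step = 7
--     for i in range(int(n/2)-1):
--         prev += step
--         step += 4
--         meta_step += 4
--     return prev, meta_step
-- ===== SOURCE B (Python) =====
-- def row_start_even(n):
--     # Closed form: the loop sums an arithmetic series, so both outputs follow directly from the iteration count.
--     odd = n % 2 == 1
--     m = max(n // 2 - 1, 0) if n >= 0 else 0
--     prev = (5 if odd else 7) + m * (8 if odd else 10) + 2 * m * (m - 1)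
--     return prev, 7 + 4 * m
-- ===== Notes on version B (the rewrite author's own statement) =====
-- stated objective: faster
-- what changed: Replaced the linear accumulation loop by closed-form arithmetic-series formulas for both returned values, computed directly from the loop count.
import Mathlib
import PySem

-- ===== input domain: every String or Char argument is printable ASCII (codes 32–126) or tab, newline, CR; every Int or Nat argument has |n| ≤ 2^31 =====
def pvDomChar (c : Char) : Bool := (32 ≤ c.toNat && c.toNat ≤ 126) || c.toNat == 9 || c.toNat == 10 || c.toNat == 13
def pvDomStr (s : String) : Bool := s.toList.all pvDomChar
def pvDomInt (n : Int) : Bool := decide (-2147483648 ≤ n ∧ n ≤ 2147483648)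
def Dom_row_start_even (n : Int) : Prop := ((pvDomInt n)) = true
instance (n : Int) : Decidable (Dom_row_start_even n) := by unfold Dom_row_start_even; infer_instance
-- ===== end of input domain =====

-- B replaces A's O(n) accumulation loop by closed-form arithmetic-series formulas (objective: faster).


-- ===== PORT A =====
-- int(n/2) truncates toward zero; exact on |n| ≤ 2^31 (n/2 is an exact double) → Int.tdiv n 2
def row_start_even (n : Int) : Int × Int :=
  let prev : Int := if PySem.Int.mod n 2 ≠ 0 then 5 else 7
  let step : Int := if PySem.Int.mod n 2 ≠ 0 then 8 else 10
  let meta_step : Int := 7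
  let s := (PySem.List.pyRange 0 (Int.tdiv n 2 - 1) 1).foldl
    (fun (st : Int × Int × Int) _ => (st.1 + st.2.1, st.2.1 + 4, st.2.2 + 4))
    (prev, step, meta_step)
  (s.1, s.2.2)

-- ===== PORT B =====
def row_start_even_alt (n : Int) : Int × Int :=
  let odd : Bool := PySem.Int.mod n 2 == 1
  let m : Int := if n ≥ 0 then max (PySem.Int.floordiv n 2 - 1) 0 else 0
  let prev : Int := (if odd then 5 else 7) + m * (if odd then 8 else 10) + 2 * m * (m - 1)
  (prev, 7 + 4 * m)

-- ===== PRECONDITION & SPEC =====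
def Spec_row_start_even (n : Int) (out : Int × Int) : Prop := out = row_start_even_alt n
instance (n : Int) (out : Int × Int) : Decidable (Spec_row_start_even n out) := by unfold Spec_row_start_even; infer_instance

-- ===== CLAIM (what is proved, stated in full; the proofs are below) =====
def Claim_equal_row_start_even : Prop := ∀ (n : Int), Dom_row_start_even n → Spec_row_start_even n (row_start_even n)

-- ===== LEMMAS AND PROOFS =====
theorem rse_foldl_closed (l : List Int) : ∀ (p s m : Int),
    l.foldl (fun (st : Int × Int × Int) _ => (st.1 + st.2.1, st.2.1 + 4, st.2.2 + 4)) (p, s, m)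
      = (p + (l.length : Int) * s + 2 * l.length * (l.length - 1), s + 4 * l.length, m + 4 * l.length) := by
  induction l with
  | nil => intro p s m; simp
  | cons a t ih =>
    intro p s m
    simp only [List.foldl_cons, List.length_cons, ih]
    refine Prod.ext ?_ (Prod.ext ?_ ?_) <;> (simp; try ring)

-- ===== VERDICT (by name: the statement is the Claim_ definition above) =====

theorem row_start_even_spec : Claim_equal_row_start_even := by
  intro n _
  unfold Spec_row_start_even row_start_even row_start_even_alt
  simp only [rse_foldl_closed, PySem.List.length_pyRange_one]
  have hmod : PySem.Int.mod n 2 = n % 2 := PySem.Int.mod_eq_emod_of_pos (by omega)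
  have hfd : PySem.Int.floordiv n 2 = n / 2 := PySem.Int.floordiv_eq_ediv_of_pos (by omega)
  have hodd : (PySem.Int.mod n 2 ≠ 0) ↔ (PySem.Int.mod n 2 == 1) = true := by
    rw [hmod]; constructor <;> intro h <;> simp_all
  have hm : ((Int.tdiv n 2 - 1 - 0).toNat : Int)
      = (if n ≥ 0 then max (PySem.Int.floordiv n 2 - 1) 0 else 0) := by
    rw [hfd]
    rcases em (0 ≤ n) with h | h
    · rw [if_pos h]
      have : Int.tdiv n 2 = n / 2 := Int.tdiv_eq_ediv_of_nonneg h  -- t-div = floor div for n ≥ 0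
      omega
    · rw [if_neg (by omega)]
      have h2 : Int.tdiv n 2 ≤ 0 := by
        have := Int.tdiv_le_tdiv (c := 2) (by omega) (show n ≤ 0 by omega)
        simpa using this
      omega
  rcases em (PySem.Int.mod n 2 ≠ 0) with h | h
  · simp only [if_pos h, if_pos (hodd.mp h), ← hm]
  · have hb : ¬ ((PySem.Int.mod n 2 == 1) = true) := fun hh => h (hodd.mpr hh)
    simp only [if_neg h, if_neg hb, ← hm]
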